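-- pv_equiv track=rewrite | github.com/chafla/Pory2 | cogs/rmd.py | _pprint_rescue_code
-- ===== SOURCE A (Python) =====
-- def _pprint_rescue_code(code: str) -> str:
--
--     output = ["```\n"]
--
--     for i, char in enumerate(code):
--
--         cur_scan = i % 20
--         if cur_scan == 6 or cur_scan == 12:
--             output.append(char)
--             output.append("  ")
--         elif cur_scan == 0:
--             output.append("\n" + char)
--         else:
--             output.append(char)
--     output.append("```")
--
--     return "".join(output)
-- ===== SOURCE B (Python) =====
-- def _pprint_rescue_code(code: str) -> str:
--     out = "```\n"
--     rest = code
--     while rest: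
--         chunk = rest[:20]
--         line = "\n" + chunk[:7]
--         if len(chunk) > 6:
--             line += "  "
--         line += chunk[7:13]
--         if len(chunk) > 12:
--             line += "  "
--         line += chunk[13:20]
--         out += line
--         rest = rest[20:]
--     return out + "```"
-- ===== Notes on version B (the rewrite author's own statement) =====
-- stated objective: simpler
-- what changed: B slices the code into whole 20-character chunks and builds each formatted line from chunk slices (chunk[:7], chunk[7:13], chunk[13:20]) with length-guarded separators, replacing A's per-character loop that dispatches on i % 20.
import Mathlib
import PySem

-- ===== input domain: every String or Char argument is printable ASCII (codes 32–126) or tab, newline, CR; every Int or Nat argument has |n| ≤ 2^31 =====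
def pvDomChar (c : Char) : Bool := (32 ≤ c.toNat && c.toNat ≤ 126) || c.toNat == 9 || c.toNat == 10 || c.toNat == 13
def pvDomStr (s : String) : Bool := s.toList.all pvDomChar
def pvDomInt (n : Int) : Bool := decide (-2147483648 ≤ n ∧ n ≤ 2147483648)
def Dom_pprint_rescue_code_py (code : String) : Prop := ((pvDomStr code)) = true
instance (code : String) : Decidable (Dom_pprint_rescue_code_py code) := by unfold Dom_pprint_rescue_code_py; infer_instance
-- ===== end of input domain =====

-- B reformats the code by whole 20-character chunks (slice-based line builder) instead of
-- A's per-character index-mod-20 state machine: same output, a simpler decomposition (objective: simpler).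

-- ===== PORT A =====
-- the for-loop over enumerate(code), accumulating the list `output` of string pieces
def pvALoop : List (Int × Char) → List (List Char) → List (List Char)
  | [], output => output
  | p :: rest, output =>
    let cur_scan := PySem.Int.mod p.1 20
    if cur_scan = 6 ∨ cur_scan = 12 then pvALoop rest (output ++ [[p.2], [' ', ' ']])
    else if cur_scan = 0 then pvALoop rest (output ++ [['\n', p.2]])
    else pvALoop rest (output ++ [[p.2]])

def pprint_rescue_code_py (code : String) : String :=
  -- "".join(output) after appending "```"
  String.ofList (List.flatten (pvALoop (PySem.List.enumerate code.toList) [['`', '`', '`', '\n']] ++ [['`', '`', '`']]))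

-- ===== PORT B =====
-- line = "\n" + chunk[:7] (+ "  ") + chunk[7:13] (+ "  ") + chunk[13:20]
def pvBLine (chunk : List Char) : List Char :=
  let l1 := '\n' :: PySem.List.slice chunk none (some 7)
  let l2 := if chunk.length > 6 then l1 ++ [' ', ' '] else l1
  let l3 := l2 ++ PySem.List.slice chunk (some 7) (some 13)
  let l4 := if chunk.length > 12 then l3 ++ [' ', ' '] else l3
  l4 ++ PySem.List.slice chunk (some 13) (some 20)

-- the while-loop: consume rest[:20] as a chunk, continue with rest[20:]
def pvBGo (rest : List Char) : List Char :=
  if rest = [] then []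
  else pvBLine (PySem.List.slice rest none (some 20)) ++ pvBGo (PySem.List.slice rest (some 20) none)
termination_by rest.length
decreasing_by
  rename_i h
  rw [PySem.List.slice_from rest (by omega)]
  cases rest with
  | nil => exact absurd rfl h
  | cons c cs => simp

def pprint_rescue_code_py_alt (code : String) : String :=
  String.ofList (['`', '`', '`', '\n'] ++ pvBGo code.toList ++ ['`', '`', '`'])

-- ===== PRECONDITION & SPEC =====
def Spec_pprint_rescue_code_py (code : String) (out : String) : Prop := out = pprint_rescue_code_py_alt code
instance (code : String) (out : String) : Decidable (Spec_pprint_rescue_code_py code out) := by unfold Spec_pprint_rescue_code_py; infer_instance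

-- ===== CLAIM (what is proved, stated in full; the proofs are below) =====
def Claim_equal_pprint_rescue_code_py : Prop := ∀ (code : String), Dom_pprint_rescue_code_py code → Spec_pprint_rescue_code_py code (pprint_rescue_code_py code)

-- ===== LEMMAS AND PROOFS =====

-- what A emits for the character at position i (depending only on i % 20)
def pieceF (r : Nat) (c : Char) : List Char :=
  if r = 6 ∨ r = 12 then [c, ' ', ' '] else if r = 0 then ['\n', c] else [c]

-- A's whole loop output (flattened), with a running position counter
def specGo : List Char → Nat → List Char
  | [], _ => []
  | c :: cs, i => pieceF (i % 20) c ++ specGo cs (i + 1)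

lemma int_mod_natCast (k : Nat) : PySem.Int.mod (k : Int) 20 = ((k % 20 : Nat) : Int) := by
  simp [PySem.Int.mod, Int.fmod_eq_emod]

lemma A_flat (cs : List Char) : ∀ (k : Nat) (out : List (List Char)),
    List.flatten (pvALoop (PySem.List.enumerate cs (k : Int)) out) = List.flatten out ++ specGo cs k := by
  induction cs with
  | nil => intro k out; simp [PySem.List.enumerate_nil, pvALoop, specGo]
  | cons c cs ih =>
    intro k out
    rw [PySem.List.enumerate_cons]
    show List.flatten (pvALoop ((((k : Int)), c) :: PySem.List.enumerate cs ((k : Int) + 1)) out) = _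
    have hcast : ((k : Int)) + 1 = ((k + 1 : Nat) : Int) := by push_cast; ring
    rw [pvALoop, hcast]
    simp only [int_mod_natCast]
    by_cases h6 : k % 20 = 6 ∨ k % 20 = 12
    · have : ((k % 20 : Nat) : Int) = 6 ∨ ((k % 20 : Nat) : Int) = 12 := by omega
      rw [if_pos this, ih, specGo, pieceF, if_pos h6]
      simp
    · have hni : ¬ (((k % 20 : Nat) : Int) = 6 ∨ ((k % 20 : Nat) : Int) = 12) := by omega
      rw [if_neg hni]
      by_cases h0 : k % 20 = 0
      · have : ((k % 20 : Nat) : Int) = 0 := by omega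
        rw [if_pos this, ih, specGo, pieceF, if_neg h6, if_pos h0]
        simp
      · have : ¬ ((k % 20 : Nat) : Int) = 0 := by omega
        rw [if_neg this, ih, specGo, pieceF, if_neg h6, if_neg h0]
        simp

lemma spec_mod : ∀ (cs : List Char) (i j : Nat), i % 20 = j % 20 → specGo cs i = specGo cs j := by
  intro cs
  induction cs with
  | nil => intro i j _; rfl
  | cons c cs ih =>
    intro i j h
    rw [specGo, specGo, h, ih (i + 1) (j + 1) (by omega)]

lemma pvBGo_cons (c : Char) (cs : List Char) :
    pvBGo (c :: cs) = pvBLine ((c :: cs).take 20) ++ pvBGo ((c :: cs).drop 20) := by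
  rw [pvBGo]
  rw [if_neg (by simp), PySem.List.slice_to _ (by omega), PySem.List.slice_from _ (by omega)]
  rw [show ((20 : Int).toNat) = 20 from rfl]

lemma pvBLine_eq (chunk : List Char) :
    pvBLine chunk = '\n' :: chunk.take 7
      ++ (if chunk.length > 6 then [' ', ' '] else [])
      ++ (chunk.drop 7).take 6
      ++ (if chunk.length > 12 then [' ', ' '] else [])
      ++ (chunk.drop 13).take 7 := by
  rw [pvBLine]
  rw [PySem.List.slice_to _ (by omega), PySem.List.slice_toNat _ (by omega) (by omega),
      PySem.List.slice_toNat _ (by omega) (by omega)]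
  split_ifs <;> simp

lemma pvMain : ∀ (cs : List Char), specGo cs 0 = pvBGo cs
  | [] => by simp [specGo, pvBGo]
  | c0 :: [] => by
      rw [pvBGo_cons, pvBLine_eq]
      simp [specGo, pieceF, pvBGo]
  | c0 :: c1 :: [] => by
      rw [pvBGo_cons, pvBLine_eq]
      simp [specGo, pieceF, pvBGo]
  | c0 :: c1 :: c2 :: [] => by
      rw [pvBGo_cons, pvBLine_eq]
      simp [specGo, pieceF, pvBGo]
  | c0 :: c1 :: c2 :: c3 :: [] => by
      rw [pvBGo_cons, pvBLine_eq]
      simp [specGo, pieceF, pvBGo]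
  | c0 :: c1 :: c2 :: c3 :: c4 :: [] => by
      rw [pvBGo_cons, pvBLine_eq]
      simp [specGo, pieceF, pvBGo]
  | c0 :: c1 :: c2 :: c3 :: c4 :: c5 :: [] => by
      rw [pvBGo_cons, pvBLine_eq]
      simp [specGo, pieceF, pvBGo]
  | c0 :: c1 :: c2 :: c3 :: c4 :: c5 :: c6 :: [] => by
      rw [pvBGo_cons, pvBLine_eq]
      simp [specGo, pieceF, pvBGo]
  | c0 :: c1 :: c2 :: c3 :: c4 :: c5 :: c6 :: c7 :: [] => by
      rw [pvBGo_cons, pvBLine_eq]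
      simp [specGo, pieceF, pvBGo]
  | c0 :: c1 :: c2 :: c3 :: c4 :: c5 :: c6 :: c7 :: c8 :: [] => by
      rw [pvBGo_cons, pvBLine_eq]
      simp [specGo, pieceF, pvBGo]
  | c0 :: c1 :: c2 :: c3 :: c4 :: c5 :: c6 :: c7 :: c8 :: c9 :: [] => by
      rw [pvBGo_cons, pvBLine_eq]
      simp [specGo, pieceF, pvBGo]
  | c0 :: c1 :: c2 :: c3 :: c4 :: c5 :: c6 :: c7 :: c8 :: c9 :: c10 :: [] => by
      rw [pvBGo_cons, pvBLine_eq]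
      simp [specGo, pieceF, pvBGo]
  | c0 :: c1 :: c2 :: c3 :: c4 :: c5 :: c6 :: c7 :: c8 :: c9 :: c10 :: c11 :: [] => by
      rw [pvBGo_cons, pvBLine_eq]
      simp [specGo, pieceF, pvBGo]
  | c0 :: c1 :: c2 :: c3 :: c4 :: c5 :: c6 :: c7 :: c8 :: c9 :: c10 :: c11 :: c12 :: [] => by
      rw [pvBGo_cons, pvBLine_eq]
      simp [specGo, pieceF, pvBGo]
  | c0 :: c1 :: c2 :: c3 :: c4 :: c5 :: c6 :: c7 :: c8 :: c9 :: c10 :: c11 :: c12 :: c13 :: [] => by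
      rw [pvBGo_cons, pvBLine_eq]
      simp [specGo, pieceF, pvBGo]
  | c0 :: c1 :: c2 :: c3 :: c4 :: c5 :: c6 :: c7 :: c8 :: c9 :: c10 :: c11 :: c12 :: c13 :: c14 :: [] => by
      rw [pvBGo_cons, pvBLine_eq]
      simp [specGo, pieceF, pvBGo]
  | c0 :: c1 :: c2 :: c3 :: c4 :: c5 :: c6 :: c7 :: c8 :: c9 :: c10 :: c11 :: c12 :: c13 :: c14 :: c15 :: [] => by
      rw [pvBGo_cons, pvBLine_eq]
      simp [specGo, pieceF, pvBGo]
  | c0 :: c1 :: c2 :: c3 :: c4 :: c5 :: c6 :: c7 :: c8 :: c9 :: c10 :: c11 :: c12 :: c13 :: c14 :: c15 :: c16 :: [] => by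
      rw [pvBGo_cons, pvBLine_eq]
      simp [specGo, pieceF, pvBGo]
  | c0 :: c1 :: c2 :: c3 :: c4 :: c5 :: c6 :: c7 :: c8 :: c9 :: c10 :: c11 :: c12 :: c13 :: c14 :: c15 :: c16 :: c17 :: [] => by
      rw [pvBGo_cons, pvBLine_eq]
      simp [specGo, pieceF, pvBGo]
  | c0 :: c1 :: c2 :: c3 :: c4 :: c5 :: c6 :: c7 :: c8 :: c9 :: c10 :: c11 :: c12 :: c13 :: c14 :: c15 :: c16 :: c17 :: c18 :: [] => by
      rw [pvBGo_cons, pvBLine_eq]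
      simp [specGo, pieceF, pvBGo]
  | c0 :: c1 :: c2 :: c3 :: c4 :: c5 :: c6 :: c7 :: c8 :: c9 :: c10 :: c11 :: c12 :: c13 :: c14 :: c15 :: c16 :: c17 :: c18 :: c19 :: rest => by
      have ih : specGo rest 20 = pvBGo rest :=
        (spec_mod rest 20 0 (by omega)).trans (pvMain rest)
      rw [pvBGo_cons, pvBLine_eq]
      simp [specGo, pieceF, ih]
termination_by cs => cs.length
decreasing_by simp; omega

-- ===== VERDICT (by name: the statement is the Claim_ definition above) =====
theorem pprint_rescue_code_py_spec : Claim_equal_pprint_rescue_code_py := by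
  intro code _
  unfold Spec_pprint_rescue_code_py pprint_rescue_code_py pprint_rescue_code_py_alt
  have h0 : PySem.List.enumerate code.toList = PySem.List.enumerate code.toList ((0 : Nat) : Int) := by norm_num
  rw [List.flatten_append, h0, A_flat code.toList 0, pvMain]
  simp
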